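-- pv_equiv track=rewrite | github.com/cadegallen-prog/CC | scripts/validate_optimized_classifier.py | is_equivalent_type
-- ===== SOURCE A (Python) =====
-- def is_equivalent_type(type1: str, type2: str) -> bool:
--     """Check if two product types are equivalent"""
--     equivalents = {
--         ('led_light_bulb', 'light_bulb'),
--         ('gfci_usb_outlet', 'usb_outlet', 'electrical_outlet'),
--         ('smart_flush_mount_light', 'flush_mount_light'),
--         ('landscape_flood_light', 'flood_light', 'landscape_lighting'),
--         ('smart_deadbolt_lock', 'door_lock'),
--         ('circuit_breaker_kit', 'circuit_breaker'),
--         ('led_track_lighting_kit', 'track_lighting'),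
--         ('mini_pendant_light', 'pendant_light'),
--         ('electrical_load_center', 'load_center'),
--         ('hvac_air_filter', 'air_filter'),
--         ('bathroom_exhaust_fan', 'exhaust_fan'),
--         ('dual_flush_toilet', 'toilet'),
--         ('kitchen_sink_with_faucet', 'sink'),
--         ('chainsaw_tuneup_kit', 'tool_kit'),
--         ('hex_driver_bits', 'drill_bit'),
--         ('sds_plus_rebar_cutter', 'specialty_cutter'),
--         ('hvlp_paint_sprayer', 'paint_sprayer'),
--         ('velcro_fastener_tape', 'tape'),
--         ('safety_respirator_cartridge', 'safety_respirator'),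
--         ('recessed_light_fixture', 'recessed_light'),
--         ('led_troffer_light', 'troffer_light'),
--         ('double_hung_window', 'window'),
--         ('multi_position_ladder', 'ladder'),
--         ('double_curtain_rod', 'curtain_rod'),
--         ('outdoor_roller_shade', 'window_shade'),
--         ('faucet_valve_stem', 'faucet_part'),
--         ('backflow_preventer_valve', 'plumbing_fitting'),
--         ('roofing_shovel_blade', 'roofing_shovel_blade'),  # Exact match required
--         ('stair_nosing_trim', 'stair_nosing_trim'),  # Exact match required
--         ('speaker_wall_mounts', 'speaker_mount'),
--         ('decorative_shelf_bracket', 'shelf_bracket'),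
--         ('surge_protector_with_usb', 'surge_protector'),
--         ('gfci_usb_outlet', 'electrical_outlet'),
--         ('usb_outlet', 'electrical_outlet'),
--     }
--
--     # Check direct equivalence
--     for equiv_set in equivalents:
--         if type1 in equiv_set and type2 in equiv_set:
--             return True
--
--     return False
-- ===== SOURCE B (Python) =====
-- # Inverted index written out flat: (token, group_id) pairs, one per token occurrence.
-- _TOKEN_GROUPS = [
--     ('led_light_bulb', 0),
--     ('light_bulb', 0),
--     ('gfci_usb_outlet', 1),
--     ('usb_outlet', 1),
--     ('electrical_outlet', 1),
--     ('smart_flush_mount_light', 2),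
--     ('flush_mount_light', 2),
--     ('landscape_flood_light', 3),
--     ('flood_light', 3),
--     ('landscape_lighting', 3),
--     ('smart_deadbolt_lock', 4),
--     ('door_lock', 4),
--     ('circuit_breaker_kit', 5),
--     ('circuit_breaker', 5),
--     ('led_track_lighting_kit', 6),
--     ('track_lighting', 6),
--     ('mini_pendant_light', 7),
--     ('pendant_light', 7),
--     ('electrical_load_center', 8),
--     ('load_center', 8),
--     ('hvac_air_filter', 9),
--     ('air_filter', 9),
--     ('bathroom_exhaust_fan', 10),
--     ('exhaust_fan', 10),
--     ('dual_flush_toilet', 11),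
--     ('toilet', 11),
--     ('kitchen_sink_with_faucet', 12),
--     ('sink', 12),
--     ('chainsaw_tuneup_kit', 13),
--     ('tool_kit', 13),
--     ('hex_driver_bits', 14),
--     ('drill_bit', 14),
--     ('sds_plus_rebar_cutter', 15),
--     ('specialty_cutter', 15),
--     ('hvlp_paint_sprayer', 16),
--     ('paint_sprayer', 16),
--     ('velcro_fastener_tape', 17),
--     ('tape', 17),
--     ('safety_respirator_cartridge', 18),
--     ('safety_respirator', 18),
--     ('recessed_light_fixture', 19),
--     ('recessed_light', 19),
--     ('led_troffer_light', 20),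
--     ('troffer_light', 20),
--     ('double_hung_window', 21),
--     ('window', 21),
--     ('multi_position_ladder', 22),
--     ('ladder', 22),
--     ('double_curtain_rod', 23),
--     ('curtain_rod', 23),
--     ('outdoor_roller_shade', 24),
--     ('window_shade', 24),
--     ('faucet_valve_stem', 25),
--     ('faucet_part', 25),
--     ('backflow_preventer_valve', 26),
--     ('plumbing_fitting', 26),
--     ('roofing_shovel_blade', 27),
--     ('roofing_shovel_blade', 27),
--     ('stair_nosing_trim', 28),
--     ('stair_nosing_trim', 28),
--     ('speaker_wall_mounts', 29),
--     ('speaker_mount', 29),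
--     ('decorative_shelf_bracket', 30),
--     ('shelf_bracket', 30),
--     ('surge_protector_with_usb', 31),
--     ('surge_protector', 31),
--     ('gfci_usb_outlet', 32),
--     ('electrical_outlet', 32),
--     ('usb_outlet', 33),
--     ('electrical_outlet', 33),]
--
--
-- def is_equivalent_type(type1: str, type2: str) -> bool:
--     """Check if two product types are equivalent"""
--     # membership: token -> set of group ids it occurs in
--     membership = {}
--     for token, gid in _TOKEN_GROUPS:
--         membership.setdefault(token, set()).add(gid)
--
--     # Equivalent iff the two tokens share at least one group
--     return bool(membership.get(type1, set()) & membership.get(type2, set()))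
-- ===== Notes on version B (the rewrite author's own statement) =====
-- stated objective: alternative
-- what changed: Replaces A's per-tuple scan checking both tokens' membership in each equivalence tuple with an inverted index: a flat (token, group id) pair table folded once into a dict token -> set of group ids, answering by intersecting the two tokens' group-id sets.
import Mathlib
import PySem

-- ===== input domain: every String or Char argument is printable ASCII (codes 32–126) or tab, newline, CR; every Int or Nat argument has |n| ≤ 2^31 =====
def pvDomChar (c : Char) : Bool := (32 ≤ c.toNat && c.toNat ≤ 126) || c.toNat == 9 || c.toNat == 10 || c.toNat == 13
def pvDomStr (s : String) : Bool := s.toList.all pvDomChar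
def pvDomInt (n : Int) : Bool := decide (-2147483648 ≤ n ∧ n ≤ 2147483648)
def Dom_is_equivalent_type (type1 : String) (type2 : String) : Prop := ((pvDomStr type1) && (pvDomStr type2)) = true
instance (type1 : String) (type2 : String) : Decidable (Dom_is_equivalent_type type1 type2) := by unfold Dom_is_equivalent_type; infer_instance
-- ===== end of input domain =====

-- B replaces A's per-tuple dual-membership scan with an inverted index: a flat (token, group id)
-- pair table folded once into a dict token -> set of group ids, answered by one set intersection;
-- objective: alternative structure, same result on every input (both are total).

-- ===== PORT A =====
-- the literal set of equivalence tuples from A, in source order (the Python iterates a set;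
-- the loop's result does not depend on the iteration order)
def equivGroupsA : List (List String) := [
  ["led_light_bulb", "light_bulb"],
  ["gfci_usb_outlet", "usb_outlet", "electrical_outlet"],
  ["smart_flush_mount_light", "flush_mount_light"],
  ["landscape_flood_light", "flood_light", "landscape_lighting"],
  ["smart_deadbolt_lock", "door_lock"],
  ["circuit_breaker_kit", "circuit_breaker"],
  ["led_track_lighting_kit", "track_lighting"],
  ["mini_pendant_light", "pendant_light"],
  ["electrical_load_center", "load_center"],
  ["hvac_air_filter", "air_filter"],
  ["bathroom_exhaust_fan", "exhaust_fan"],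
  ["dual_flush_toilet", "toilet"],
  ["kitchen_sink_with_faucet", "sink"],
  ["chainsaw_tuneup_kit", "tool_kit"],
  ["hex_driver_bits", "drill_bit"],
  ["sds_plus_rebar_cutter", "specialty_cutter"],
  ["hvlp_paint_sprayer", "paint_sprayer"],
  ["velcro_fastener_tape", "tape"],
  ["safety_respirator_cartridge", "safety_respirator"],
  ["recessed_light_fixture", "recessed_light"],
  ["led_troffer_light", "troffer_light"],
  ["double_hung_window", "window"],
  ["multi_position_ladder", "ladder"],
  ["double_curtain_rod", "curtain_rod"],
  ["outdoor_roller_shade", "window_shade"],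
  ["faucet_valve_stem", "faucet_part"],
  ["backflow_preventer_valve", "plumbing_fitting"],
  ["roofing_shovel_blade", "roofing_shovel_blade"],
  ["stair_nosing_trim", "stair_nosing_trim"],
  ["speaker_wall_mounts", "speaker_mount"],
  ["decorative_shelf_bracket", "shelf_bracket"],
  ["surge_protector_with_usb", "surge_protector"],
  ["gfci_usb_outlet", "electrical_outlet"],
  ["usb_outlet", "electrical_outlet"]
]

-- 'for equiv_set in equivalents: if type1 in equiv_set and type2 in equiv_set: return True; return False'
def aScan (type1 : String) (type2 : String) : List (List String) → Bool
  | [] => false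
  | g :: rest =>
    if g.contains type1 && g.contains type2 then true else aScan type1 type2 rest

def is_equivalent_type (type1 : String) (type2 : String) : Bool :=
  aScan type1 type2 equivGroupsA

-- ===== PORT B =====
-- _TOKEN_GROUPS: the inverted index written out flat, one (token, group id) pair per occurrence
def tokenPairs : List (String × Int) := [
  ("led_light_bulb", 0),
  ("light_bulb", 0),
  ("gfci_usb_outlet", 1),
  ("usb_outlet", 1),
  ("electrical_outlet", 1),
  ("smart_flush_mount_light", 2),
  ("flush_mount_light", 2),
  ("landscape_flood_light", 3),
  ("flood_light", 3),
  ("landscape_lighting", 3),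
  ("smart_deadbolt_lock", 4),
  ("door_lock", 4),
  ("circuit_breaker_kit", 5),
  ("circuit_breaker", 5),
  ("led_track_lighting_kit", 6),
  ("track_lighting", 6),
  ("mini_pendant_light", 7),
  ("pendant_light", 7),
  ("electrical_load_center", 8),
  ("load_center", 8),
  ("hvac_air_filter", 9),
  ("air_filter", 9),
  ("bathroom_exhaust_fan", 10),
  ("exhaust_fan", 10),
  ("dual_flush_toilet", 11),
  ("toilet", 11),
  ("kitchen_sink_with_faucet", 12),
  ("sink", 12),
  ("chainsaw_tuneup_kit", 13),
  ("tool_kit", 13),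
  ("hex_driver_bits", 14),
  ("drill_bit", 14),
  ("sds_plus_rebar_cutter", 15),
  ("specialty_cutter", 15),
  ("hvlp_paint_sprayer", 16),
  ("paint_sprayer", 16),
  ("velcro_fastener_tape", 17),
  ("tape", 17),
  ("safety_respirator_cartridge", 18),
  ("safety_respirator", 18),
  ("recessed_light_fixture", 19),
  ("recessed_light", 19),
  ("led_troffer_light", 20),
  ("troffer_light", 20),
  ("double_hung_window", 21),
  ("window", 21),
  ("multi_position_ladder", 22),
  ("ladder", 22),
  ("double_curtain_rod", 23),
  ("curtain_rod", 23),
  ("outdoor_roller_shade", 24),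
  ("window_shade", 24),
  ("faucet_valve_stem", 25),
  ("faucet_part", 25),
  ("backflow_preventer_valve", 26),
  ("plumbing_fitting", 26),
  ("roofing_shovel_blade", 27),
  ("roofing_shovel_blade", 27),
  ("stair_nosing_trim", 28),
  ("stair_nosing_trim", 28),
  ("speaker_wall_mounts", 29),
  ("speaker_mount", 29),
  ("decorative_shelf_bracket", 30),
  ("shelf_bracket", 30),
  ("surge_protector_with_usb", 31),
  ("surge_protector", 31),
  ("gfci_usb_outlet", 32),
  ("electrical_outlet", 32),
  ("usb_outlet", 33),
  ("electrical_outlet", 33)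
]

-- 'for token, gid in _TOKEN_GROUPS: membership.setdefault(token, set()).add(gid)'
def bIndex : PySem.Dict String (PySem.Set Int) :=
  tokenPairs.foldl
    (fun d p => d.modify p.1 PySem.Set.empty (fun s => PySem.Set.add s p.2))
    PySem.Dict.empty

-- bool(membership.get(type1, set()) & membership.get(type2, set()))
def is_equivalent_type_alt (type1 : String) (type2 : String) : Bool :=
  !(PySem.Set.inter (bIndex.getD type1 PySem.Set.empty) (bIndex.getD type2 PySem.Set.empty)).isEmpty

-- ===== PRECONDITION & SPEC =====
def Spec_is_equivalent_type (type1 : String) (type2 : String) (out : Bool) : Prop := out = is_equivalent_type_alt type1 type2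
instance (type1 : String) (type2 : String) (out : Bool) : Decidable (Spec_is_equivalent_type type1 type2 out) := by unfold Spec_is_equivalent_type; infer_instance

-- ===== CLAIM (what is proved, stated in full; the proofs are below) =====
def Claim_equal_is_equivalent_type : Prop := ∀ (type1 : String) (type2 : String), Dom_is_equivalent_type type1 type2 → Spec_is_equivalent_type type1 type2 (is_equivalent_type type1 type2)

-- ===== LEMMAS AND PROOFS =====

-- A's scan hits some tuple containing both tokens
theorem aScan_eq_true_iff (t1 t2 : String) (gs : List (List String)) :
    aScan t1 t2 gs = true ↔ ∃ g ∈ gs, t1 ∈ g ∧ t2 ∈ g := by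
  induction gs with
  | nil => simp [aScan]
  | cons g rest ih =>
    simp only [aScan]
    split_ifs with h
    · simp only [Bool.and_eq_true, List.contains_iff_mem] at h
      exact iff_of_true rfl ⟨g, List.mem_cons_self, h.1, h.2⟩
    · simp only [Bool.and_eq_true, List.contains_iff_mem, not_and] at h
      rw [ih]
      constructor
      · rintro ⟨g', hg', h1, h2⟩; exact ⟨g', List.mem_cons_of_mem _ hg', h1, h2⟩
      · rintro ⟨g', hg', h1, h2⟩
        rcases List.mem_cons.mp hg' with rfl | hg'
        · exact absurd (h h1) (not_not_intro h2)
        · exact ⟨g', hg', h1, h2⟩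

-- B's fold over any pair list: group id j ends up recorded under token x iff (x, j) was folded in
theorem foldl_getD_mem (ps : List (String × Int))
    (d : PySem.Dict String (PySem.Set Int)) (x : String) (j : Int) :
    j ∈ (ps.foldl (fun d p => d.modify p.1 PySem.Set.empty (fun s => PySem.Set.add s p.2)) d).getD x PySem.Set.empty ↔
      j ∈ d.getD x PySem.Set.empty ∨ (x, j) ∈ ps := by
  induction ps generalizing d with
  | nil => simp
  | cons p ps ih =>
    obtain ⟨t, i⟩ := p
    simp only [List.foldl_cons, ih]
    by_cases hx : x = t
    · subst hx
      rw [PySem.Dict.getD_modify_self, PySem.Set.mem_add]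
      simp only [List.mem_cons, Prod.mk.injEq, true_and]
      tauto
    · rw [PySem.Dict.getD_modify_of_ne _ _ _ hx]
      simp only [List.mem_cons, Prod.mk.injEq]
      tauto

theorem bIndex_getD_mem (x : String) (j : Int) :
    j ∈ bIndex.getD x PySem.Set.empty ↔ (x, j) ∈ tokenPairs := by
  rw [bIndex, foldl_getD_mem]
  have hempty : j ∈ (PySem.Dict.empty : PySem.Dict String (PySem.Set Int)).getD x PySem.Set.empty ↔ False := by
    simp [PySem.Dict.getD, PySem.Dict.get?, PySem.Dict.empty, PySem.Set.empty]
  rw [hempty, false_or]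

-- the flat pair table is exactly A's enumerated groups flattened (pure literal rearrangement)
theorem pairs_eq :
    tokenPairs = (PySem.List.enumerate equivGroupsA 0).flatMap (fun p => p.2.map (fun t => (t, p.1))) := rfl

theorem mem_tokenPairs_iff (x : String) (j : Int) :
    (x, j) ∈ tokenPairs ↔ ∃ k : Nat, ∃ h : k < equivGroupsA.length, j = (k : Int) ∧ x ∈ equivGroupsA[k] := by
  rw [pairs_eq, List.mem_flatMap]
  constructor
  · rintro ⟨p, hp, hx⟩
    obtain ⟨k, hk, hpk⟩ := (PySem.List.mem_enumerate_iff _ _ _).mp hp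
    obtain ⟨t, ht, hxt⟩ := List.mem_map.mp hx
    have h1 : x = t := by simpa using congrArg Prod.fst hxt.symm
    have h2 : j = p.1 := by simpa using congrArg Prod.snd hxt.symm
    have hf : p.1 = (k : Int) := by simpa using congrArg Prod.fst hpk
    have hs : p.2 = equivGroupsA[k] := by simpa using congrArg Prod.snd hpk
    exact ⟨k, hk, h2.trans hf, h1 ▸ (hs ▸ ht)⟩
  · rintro ⟨k, hk, rfl, hx⟩
    exact ⟨((k : Int), equivGroupsA[k]),
      (PySem.List.mem_enumerate_iff _ _ _).mpr ⟨k, hk, by simp⟩,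
      List.mem_map.mpr ⟨x, hx, rfl⟩⟩

theorem alt_eq_true_iff (t1 t2 : String) :
    is_equivalent_type_alt t1 t2 = true ↔
      ∃ k : Nat, ∃ h : k < equivGroupsA.length, t1 ∈ equivGroupsA[k] ∧ t2 ∈ equivGroupsA[k] := by
  rw [is_equivalent_type_alt, Bool.not_eq_eq_eq_not, Bool.not_true,
    List.isEmpty_eq_false_iff_exists_mem]
  constructor
  · rintro ⟨j, hj⟩
    have hj' := (PySem.Set.mem_inter _ _ _).mp hj
    obtain ⟨k, hk, hjk, h1⟩ := (mem_tokenPairs_iff t1 j).mp ((bIndex_getD_mem t1 j).mp hj'.1)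
    obtain ⟨k', hk', hjk', h2⟩ := (mem_tokenPairs_iff t2 j).mp ((bIndex_getD_mem t2 j).mp hj'.2)
    have hkk : k' = k := by
      have : (k : Int) = (k' : Int) := by rw [← hjk, hjk']
      exact_mod_cast this.symm
    subst hkk
    exact ⟨k', hk', h1, h2⟩
  · rintro ⟨k, hk, h1, h2⟩
    exact ⟨(k : Int), (PySem.Set.mem_inter _ _ _).mpr
      ⟨(bIndex_getD_mem t1 _).mpr ((mem_tokenPairs_iff t1 _).mpr ⟨k, hk, rfl, h1⟩),
       (bIndex_getD_mem t2 _).mpr ((mem_tokenPairs_iff t2 _).mpr ⟨k, hk, rfl, h2⟩)⟩⟩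

-- ===== VERDICT (by name: the statement is the Claim_ definition above) =====
theorem is_equivalent_type_spec : Claim_equal_is_equivalent_type := by
  intro t1 t2 _
  show is_equivalent_type t1 t2 = is_equivalent_type_alt t1 t2
  rw [Bool.eq_iff_iff, is_equivalent_type, aScan_eq_true_iff, alt_eq_true_iff]
  constructor
  · rintro ⟨g, hg, h1, h2⟩
    rcases List.mem_iff_getElem.mp hg with ⟨k, hk, rfl⟩
    exact ⟨k, hk, h1, h2⟩
  · rintro ⟨k, hk, h1, h2⟩
    exact ⟨equivGroupsA[k], List.getElem_mem _, h1, h2⟩
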